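-- pv_equiv track=rewrite | github.com/ShotaHirabayashi/w-manual-bot | chat_ui/management/commands/load_qa_data.py | qa_from_block
-- ===== SOURCE A (Python) =====
-- def qa_from_block(block: str) -> tuple:
--     """ブロックから質問と回答を抽出"""
--     lines = block.replace("\r\n", "\n").replace("\r", "\n").split("\n")
--
--     # 先頭・末尾の空行を除去
--     while lines and not lines[0].strip():
--         lines.pop(0)
--     while lines and not lines[-1].strip():
--         lines.pop()
--
--     if not lines:
--         return None, None
--
--     q = lines[0].strip()
--     a_lines = lines[1:]
--
--     # 先頭に空行が1つ入っているケースに対応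
--     while a_lines and not a_lines[0].strip():
--         a_lines.pop(0)
--
--     a = "\n".join(a_lines).strip()
--     return q, a
-- ===== SOURCE B (Python) =====
-- def qa_from_block(block: str) -> tuple:
--     """Strip the whole normalized string once, then split at the first newline."""
--     body = block.replace("\r\n", "\n").replace("\r", "\n").strip()
--     if not body:
--         return None, None
--     first, _, rest = body.partition("\n")
--     return first.strip(), rest.strip()
-- ===== Notes on version B (the rewrite author's own statement) =====
-- stated objective: simpler
-- what changed: Replaces splitting into a line list with three blank-line pop loops and a join by a single strip of the whole normalized string followed by a partition at the first newline.
import Mathlib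
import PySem

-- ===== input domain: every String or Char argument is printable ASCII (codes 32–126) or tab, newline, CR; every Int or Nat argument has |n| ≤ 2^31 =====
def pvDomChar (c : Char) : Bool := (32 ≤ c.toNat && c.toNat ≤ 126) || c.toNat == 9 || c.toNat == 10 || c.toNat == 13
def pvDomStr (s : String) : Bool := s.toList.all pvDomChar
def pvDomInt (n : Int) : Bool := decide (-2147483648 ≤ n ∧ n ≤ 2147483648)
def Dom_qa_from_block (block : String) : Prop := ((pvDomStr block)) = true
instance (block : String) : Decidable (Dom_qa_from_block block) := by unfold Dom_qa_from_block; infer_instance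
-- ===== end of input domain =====

-- B replaces A's line list with its three blank-line pop loops by one strip of the whole
-- normalized string followed by a partition at the first newline (objective: simpler).

-- ===== PORT A =====
-- while lines and not lines[-1].strip(): lines.pop()   (structural recursion: drop trailing blank lines)
def popTrailing (ls : List (List Char)) : List (List Char) :=
  match ls with
  | [] => []
  | l :: r =>
    if (popTrailing r).isEmpty && (PySem.Chars.strip l).isEmpty then [] else l :: popTrailing r

def qa_from_block (block : String) : Option String × Option String :=
  -- lines = block.replace("\r\n", "\n").replace("\r", "\n").split("\n")
  let lines := PySem.Chars.splitOn
      (PySem.Chars.replace (PySem.Chars.replace block.toList ['\r', '\n'] ['\n']) ['\r'] ['\n']) ['\n']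
  -- while lines and not lines[0].strip(): lines.pop(0)
  let lines := lines.dropWhile (fun l => (PySem.Chars.strip l).isEmpty)
  -- while lines and not lines[-1].strip(): lines.pop()
  let lines := popTrailing lines
  match lines with
  | [] => (none, none)                              -- if not lines: return None, None
  | l0 :: rest =>
    let q := PySem.Chars.strip l0                   -- q = lines[0].strip()
    -- a_lines = lines[1:]; while a_lines and not a_lines[0].strip(): a_lines.pop(0)
    let aLines := rest.dropWhile (fun l => (PySem.Chars.strip l).isEmpty)
    let a := PySem.Chars.strip (PySem.Chars.join ['\n'] aLines)   -- a = "\n".join(a_lines).strip()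
    (some (String.ofList q), some (String.ofList a))

-- ===== PORT B =====
-- body.partition("\n") for this one-char separator, ported by hand (PySem has no partition):
-- returns (part before the first '\n', part after it); ([], rest-of-nothing = []) when absent —
-- exact: Python's third piece is "" when the separator is absent, and Source B drops the middle piece.
def partNl : List Char → List Char × List Char
  | [] => ([], [])
  | c :: t => if c = '\n' then ([], t) else
      let p := partNl t
      (c :: p.1, p.2)

def qa_from_block_alt (block : String) : Option String × Option String :=
  -- body = block.replace("\r\n", "\n").replace("\r", "\n").strip()
  let body := PySem.Chars.strip
      (PySem.Chars.replace (PySem.Chars.replace block.toList ['\r', '\n'] ['\n']) ['\r'] ['\n'])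
  if body.isEmpty then (none, none)                 -- if not body: return None, None
  else
    let p := partNl body                            -- first, _, rest = body.partition("\n")
    (some (String.ofList (PySem.Chars.strip p.1)), some (String.ofList (PySem.Chars.strip p.2)))

-- ===== PRECONDITION & SPEC =====
def Spec_qa_from_block (block : String) (out : Option String × Option String) : Prop := out = qa_from_block_alt block
instance (block : String) (out : Option String × Option String) : Decidable (Spec_qa_from_block block out) := by unfold Spec_qa_from_block; infer_instance

-- ===== CLAIM (what is proved, stated in full; the proofs are below) =====
def Claim_equal_qa_from_block : Prop := ∀ (block : String), Dom_qa_from_block block → Spec_qa_from_block block (qa_from_block block)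

-- ===== LEMMAS AND PROOFS =====

-- simple recursive model of s.split("\n") (proof device only)
def mySplit : List Char → List (List Char)
  | [] => [[]]
  | c :: t =>
    match mySplit t with
    | [] => [[]]
    | p :: ps => if c = '\n' then [] :: p :: ps else (c :: p) :: ps

theorem mySplit_ne_nil (cs : List Char) : mySplit cs ≠ [] := by
  induction cs with
  | nil => simp [mySplit]
  | cons c t ih =>
    simp only [mySplit]
    rcases mySplit t with _ | ⟨p, ps⟩
    · simp
    · by_cases hc : c = '\n' <;> simp [hc]


theorem go_newline (fuel : Nat) : ∀ (l cur : List Char) (hacc : List (List Char))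
    (p : List Char) (ps : List (List Char)), l.length < fuel → mySplit l = p :: ps →
    PySem.Chars.splitOn.go ['\n'] fuel l cur hacc = hacc.reverse ++ (cur.reverse ++ p) :: ps := by
  induction fuel with
  | zero => intro l cur hacc p ps h _; omega
  | succ n ih =>
    intro l cur hacc p ps h hsp
    cases l with
    | nil =>
      simp only [mySplit] at hsp
      obtain ⟨rfl, rfl⟩ := List.cons.inj hsp
      rw [PySem.Chars.splitOn.go.eq_def]
      show (cur.reverse :: hacc).reverse = _
      simp
    | cons c rest =>
      rcases hms : mySplit rest with _ | ⟨q, qs⟩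
      · exact absurd hms (mySplit_ne_nil rest)
      rw [PySem.Chars.splitOn.go.eq_def]
      show (if ['\n'].isPrefixOf (c :: rest) = true
            then PySem.Chars.splitOn.go ['\n'] n rest [] (cur.reverse :: hacc)
            else PySem.Chars.splitOn.go ['\n'] n rest (c :: cur) hacc) = _
      have hlen : rest.length < n := by simp at h; omega
      simp only [mySplit, hms] at hsp
      by_cases hc : c = '\n'
      · subst hc
        rw [if_pos (by simp [List.isPrefixOf])]
        rw [ih rest [] (cur.reverse :: hacc) q qs hlen hms]
        rw [if_pos rfl] at hsp
        obtain ⟨rfl, rfl⟩ := List.cons.inj hsp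
        simp
      · rw [if_neg (by simp [List.isPrefixOf]; exact fun h => hc h.symm)]
        rw [ih rest (c :: cur) hacc q qs hlen hms]
        rw [if_neg hc] at hsp
        obtain ⟨rfl, rfl⟩ := List.cons.inj hsp
        simp

theorem splitOn_newline (cs : List Char) : PySem.Chars.splitOn cs ['\n'] = mySplit cs := by
  rcases hms : mySplit cs with _ | ⟨p, ps⟩
  · exact absurd hms (mySplit_ne_nil cs)
  · unfold PySem.Chars.splitOn
    rw [go_newline (cs.length + 1) cs [] [] p ps (by omega) hms]
    simp

theorem join_mySplit (cs : List Char) : PySem.Chars.join ['\n'] (mySplit cs) = cs := by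
  induction cs with
  | nil => simp [mySplit, PySem.Chars.join_singleton]
  | cons c t ih =>
    simp only [mySplit]
    rcases hms : mySplit t with _ | ⟨p, ps⟩
    · exact absurd hms (mySplit_ne_nil t)
    · rw [hms] at ih
      show PySem.Chars.join ['\n'] (if c = '\n' then [] :: p :: ps else (c :: p) :: ps) = c :: t
      by_cases hc : c = '\n'
      · subst hc
        rw [if_pos rfl, PySem.Chars.join_cons_cons, ih]
        simp
      · rw [if_neg hc]
        cases ps with
        | nil =>
          rw [PySem.Chars.join_singleton]
          rw [PySem.Chars.join_singleton] at ih
          rw [ih]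
        | cons q qs =>
          rw [PySem.Chars.join_cons_cons] at ih ⊢
          rw [← ih]
          simp

theorem noNl_mySplit (cs : List Char) : ∀ l ∈ mySplit cs, '\n' ∉ l := by
  induction cs with
  | nil =>
    intro l hl
    simp only [mySplit, List.mem_singleton] at hl
    subst hl; simp
  | cons c t ih =>
    intro l hl
    simp only [mySplit] at hl
    rcases hms : mySplit t with _ | ⟨p, ps⟩
    · exact absurd hms (mySplit_ne_nil t)
    · rw [hms] at hl
      replace hl : l ∈ (if c = '\n' then [] :: p :: ps else (c :: p) :: ps) := hl
      have hp : '\n' ∉ p := ih p (by rw [hms]; exact List.mem_cons_self)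
      have hps : ∀ l' ∈ ps, '\n' ∉ l' := fun l' h' => ih l' (by rw [hms]; exact List.mem_cons_of_mem _ h')
      by_cases hc : c = '\n'
      · subst hc
        rw [if_pos rfl] at hl
        rcases List.mem_cons.1 hl with rfl | hl'
        · simp
        · rcases List.mem_cons.1 hl' with rfl | hl''
          · exact hp
          · exact hps _ hl''
      · rw [if_neg hc] at hl
        rcases List.mem_cons.1 hl with rfl | hl'
        · intro hmem
          rcases List.mem_cons.1 hmem with h' | h'
          · exact hc h'.symm
          · exact hp h'
        · exact hps _ hl'

-- strip basics
theorem lstrip_eq_nil_iff (l : List Char) : PySem.Chars.lstrip l = [] ↔ l.all PySem.Chars.isspace = true := by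
  simp [PySem.Chars.lstrip, List.dropWhile_eq_nil_iff, List.all_eq_true, PySem.Chars.isspace]


theorem rstrip_eq_nil_iff (l : List Char) : PySem.Chars.rstrip l = [] ↔ l.all PySem.Chars.isspace = true := by
  simp [PySem.Chars.rstrip, List.dropWhile_eq_nil_iff, List.all_eq_true, PySem.Chars.isspace]


theorem strip_eq_nil_iff (l : List Char) : PySem.Chars.strip l = [] ↔ l.all PySem.Chars.isspace = true := by
  unfold PySem.Chars.strip
  constructor
  · intro h
    have h' : (PySem.Chars.lstrip l).all PySem.Chars.isspace = true := (rstrip_eq_nil_iff _).1 h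
    have hdecomp : List.takeWhile PySem.Chars.isspace l ++ PySem.Chars.lstrip l = l := List.takeWhile_append_dropWhile
    rw [← hdecomp, List.all_append, h', Bool.and_true, List.all_eq_true]
    intro x hx; exact List.mem_takeWhile_imp hx
  · intro h
    rw [(lstrip_eq_nil_iff l).2 h]; rfl


theorem rstrip_append_blank {x y : List Char} (hy : y.all PySem.Chars.isspace = true) :
    PySem.Chars.rstrip (x ++ y) = PySem.Chars.rstrip x := by
  unfold PySem.Chars.rstrip
  rw [List.reverse_append, List.dropWhile_append]
  have h1 : List.dropWhile PySem.Chars.isspace y.reverse = [] :=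
    List.dropWhile_eq_nil_iff.2 (fun x hx => (List.all_eq_true.1 hy) x (List.mem_reverse.1 hx))
  simp [h1]

theorem rstrip_append_of_ne {x y : List Char} (hy : PySem.Chars.rstrip y ≠ []) :
    PySem.Chars.rstrip (x ++ y) = x ++ PySem.Chars.rstrip y := by
  unfold PySem.Chars.rstrip at *
  rw [List.reverse_append, List.dropWhile_append]
  have h1 : List.dropWhile PySem.Chars.isspace y.reverse ≠ [] := by
    intro h0; exact hy (by rw [h0]; rfl)
  rw [if_neg (by simp [List.isEmpty_iff, h1])]
  simp

theorem strip_append_blank {x y : List Char} (hy : y.all PySem.Chars.isspace = true) :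
    PySem.Chars.strip (x ++ y) = PySem.Chars.strip x := by
  by_cases hx : x.all PySem.Chars.isspace
  · have hxy : (x ++ y).all PySem.Chars.isspace := by simp [List.all_append, hx, hy]
    rw [(strip_eq_nil_iff _).2 hxy, (strip_eq_nil_iff _).2 hx]
  · unfold PySem.Chars.strip PySem.Chars.lstrip
    have hne : List.dropWhile PySem.Chars.isspace x ≠ [] := by
      intro h0; exact hx (List.all_eq_true.2 (List.dropWhile_eq_nil_iff.1 h0))
    rw [List.dropWhile_append, if_neg (by simp [List.isEmpty_iff, hne])]
    exact rstrip_append_blank hy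

theorem strip_blank_append {x y : List Char} (hx : x.all PySem.Chars.isspace = true) :
    PySem.Chars.strip (x ++ y) = PySem.Chars.strip y := by
  unfold PySem.Chars.strip PySem.Chars.lstrip
  rw [List.dropWhile_append, if_pos (by
    simp only [List.isEmpty_iff, List.dropWhile_eq_nil_iff]
    exact fun x hxx => List.all_eq_true.1 hx x hxx)]

theorem strip_lstrip (l : List Char) : PySem.Chars.strip (PySem.Chars.lstrip l) = PySem.Chars.strip l := by
  conv_rhs => rw [← List.takeWhile_append_dropWhile (p := PySem.Chars.isspace) (l := l)]
  rw [strip_blank_append (by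
    rw [List.all_eq_true]; exact fun x hx => List.mem_takeWhile_imp hx)]
  rfl

theorem strip_rstrip (l : List Char) : PySem.Chars.strip (PySem.Chars.rstrip l) = PySem.Chars.strip l := by
  have hdec : PySem.Chars.rstrip l ++ (List.takeWhile PySem.Chars.isspace l.reverse).reverse = l := by
    unfold PySem.Chars.rstrip
    rw [← List.reverse_append, List.takeWhile_append_dropWhile, List.reverse_reverse]
  conv_rhs => rw [← hdec]
  rw [strip_append_blank (by
    rw [List.all_eq_true]
    exact fun x hx => List.mem_takeWhile_imp (List.mem_reverse.1 hx))]

theorem strip_strip (l : List Char) : PySem.Chars.strip (PySem.Chars.strip l) = PySem.Chars.strip l := by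
  conv_lhs => rw [show PySem.Chars.strip l = PySem.Chars.rstrip (PySem.Chars.lstrip l) from rfl]
  rw [strip_rstrip, strip_lstrip]

theorem mem_lstrip {x : Char} {l : List Char} (h : x ∈ PySem.Chars.lstrip l) : x ∈ l := by
  unfold PySem.Chars.lstrip at h
  exact List.Sublist.mem h (List.dropWhile_sublist _)

theorem mem_strip {x : Char} {l : List Char} (h : x ∈ PySem.Chars.strip l) : x ∈ l := by
  unfold PySem.Chars.strip PySem.Chars.rstrip at h
  have h1 : x ∈ PySem.Chars.lstrip l := by
    have := List.Sublist.mem (List.mem_reverse.1 h) (List.dropWhile_sublist _)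
    exact List.mem_reverse.1 this
  exact mem_lstrip h1

-- join and blank lines
theorem join_append (P S : List (List Char)) (hP : P ≠ []) (hS : S ≠ []) :
    PySem.Chars.join ['\n'] (P ++ S) =
      PySem.Chars.join ['\n'] P ++ ['\n'] ++ PySem.Chars.join ['\n'] S := by
  induction P with
  | nil => exact absurd rfl hP
  | cons p P' ih =>
    cases P' with
    | nil =>
      cases S with
      | nil => exact absurd rfl hS
      | cons s S' => rw [List.singleton_append, PySem.Chars.join_cons_cons, PySem.Chars.join_singleton]
    | cons q Q =>
      show PySem.Chars.join ['\n'] (p :: q :: (Q ++ S)) = _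
      rw [PySem.Chars.join_cons_cons]
      rw [show q :: (Q ++ S) = (q :: Q) ++ S from rfl]
      rw [ih (by simp), PySem.Chars.join_cons_cons]
      simp [List.append_assoc]

theorem join_blank_of_all {t : List (List Char)} (h : ∀ l ∈ t, l.all PySem.Chars.isspace = true) :
    (PySem.Chars.join ['\n'] t).all PySem.Chars.isspace = true := by
  induction t with
  | nil => simp [PySem.Chars.join_nil]
  | cons l r ih =>
    cases r with
    | nil => rw [PySem.Chars.join_singleton]; exact h l (by simp)
    | cons m r' =>
      rw [PySem.Chars.join_cons_cons]
      have h1 := h l (by simp)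
      have h2 := ih (fun l' hl' => h l' (List.mem_cons_of_mem _ hl'))
      simp [List.all_append, h1, h2]
      decide

theorem join_all_sp {t : List (List Char)} (h : (PySem.Chars.join ['\n'] t).all PySem.Chars.isspace = true) :
    ∀ l ∈ t, l.all PySem.Chars.isspace = true := by
  induction t with
  | nil => simp
  | cons l r ih =>
    cases r with
    | nil =>
      rw [PySem.Chars.join_singleton] at h
      intro l' hl'; rcases List.mem_singleton.1 hl' with rfl; exact h
    | cons m r' =>
      rw [PySem.Chars.join_cons_cons] at h
      simp only [List.all_append, Bool.and_eq_true] at h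
      obtain ⟨⟨h1, -⟩, h2⟩ := h
      intro l' hl'
      rcases List.mem_cons.1 hl' with rfl | hl''
      · exact h1
      · exact ih h2 l' hl''

theorem strip_join_append_blank {P S : List (List Char)}
    (hS : ∀ l ∈ S, (PySem.Chars.strip l).isEmpty = true) :
    PySem.Chars.strip (PySem.Chars.join ['\n'] (P ++ S)) =
      PySem.Chars.strip (PySem.Chars.join ['\n'] P) := by
  have hS' : ∀ l ∈ S, l.all PySem.Chars.isspace = true :=
    fun l h => (strip_eq_nil_iff l).1 (List.isEmpty_iff.1 (hS l h))
  by_cases hP : P = []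
  · subst hP
    rw [List.nil_append, PySem.Chars.join_nil,
      (strip_eq_nil_iff _).2 (join_blank_of_all hS')]
    rfl
  · by_cases hSe : S = []
    · subst hSe; rw [List.append_nil]
    · rw [join_append P S hP hSe, List.append_assoc]
      exact strip_append_blank (by
        simp only [List.all_append, Bool.and_eq_true]
        exact ⟨by decide, join_blank_of_all hS'⟩)

theorem strip_join_blank_append {S P : List (List Char)}
    (hS : ∀ l ∈ S, (PySem.Chars.strip l).isEmpty = true) :
    PySem.Chars.strip (PySem.Chars.join ['\n'] (S ++ P)) =
      PySem.Chars.strip (PySem.Chars.join ['\n'] P) := by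
  have hS' : ∀ l ∈ S, l.all PySem.Chars.isspace = true :=
    fun l h => (strip_eq_nil_iff l).1 (List.isEmpty_iff.1 (hS l h))
  by_cases hP : P = []
  · subst hP
    rw [List.append_nil, PySem.Chars.join_nil,
      (strip_eq_nil_iff _).2 (join_blank_of_all hS')]
    rfl
  · by_cases hSe : S = []
    · subst hSe; rw [List.nil_append]
    · rw [join_append S P hSe hP]
      exact strip_blank_append (by
        simp only [List.all_append, Bool.and_eq_true]
        exact ⟨join_blank_of_all hS', by decide⟩)

theorem strip_join_dropWhile (L : List (List Char)) :
    PySem.Chars.strip (PySem.Chars.join ['\n'] (L.dropWhile (fun l => (PySem.Chars.strip l).isEmpty))) =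
      PySem.Chars.strip (PySem.Chars.join ['\n'] L) := by
  conv_rhs => rw [← List.takeWhile_append_dropWhile
    (p := fun l => (PySem.Chars.strip l).isEmpty) (l := L)]
  exact (strip_join_blank_append
    (S := List.takeWhile (fun l => (PySem.Chars.strip l).isEmpty) L)
    (P := List.dropWhile (fun l => (PySem.Chars.strip l).isEmpty) L)
    (fun l h => by simpa using List.mem_takeWhile_imp h)).symm

-- popTrailing only removes blank lines from the end
theorem popTrailing_decomp (X : List (List Char)) :
    ∃ S, X = popTrailing X ++ S ∧ ∀ l ∈ S, (PySem.Chars.strip l).isEmpty = true := by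
  induction X with
  | nil => exact ⟨[], rfl, by simp⟩
  | cons x r ih =>
    obtain ⟨S, hr, hSb⟩ := ih
    simp only [popTrailing]
    by_cases hc : ((popTrailing r).isEmpty && (PySem.Chars.strip x).isEmpty) = true
    · rw [if_pos hc]
      rw [Bool.and_eq_true] at hc
      obtain ⟨h1, h2⟩ := hc
      refine ⟨x :: r, by simp, ?_⟩
      intro l hl
      rcases List.mem_cons.1 hl with rfl | hl'
      · exact h2
      · have : r = S := by rw [hr, List.isEmpty_iff.1 h1, List.nil_append]
        exact hSb l (this ▸ hl')
    · rw [if_neg hc]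
      exact ⟨S, by rw [List.cons_append, ← hr], hSb⟩

theorem popTrailing_last (X : List (List Char)) :
    popTrailing X = [] ∨
      ∃ l, (popTrailing X).getLast? = some l ∧ (PySem.Chars.strip l).isEmpty = false := by
  induction X with
  | nil => exact Or.inl rfl
  | cons x r ih =>
    simp only [popTrailing]
    by_cases hc : ((popTrailing r).isEmpty && (PySem.Chars.strip x).isEmpty) = true
    · rw [if_pos hc]; exact Or.inl rfl
    · rw [if_neg hc]
      right
      rcases ih with hnil | ⟨l, hl, hlb⟩
      · refine ⟨x, ?_, ?_⟩
        · rw [hnil]; rfl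
        · rw [hnil] at hc
          simpa using hc
      · cases hpt : popTrailing r with
        | nil => rw [hpt] at hl; simp at hl
        | cons y ys =>
          refine ⟨l, ?_, hlb⟩
          rw [hpt] at hl
          rw [List.getLast?_cons_cons]
          exact hl

-- partition facts
theorem partNl_no_nl {x : List Char} (h : '\n' ∉ x) : partNl x = (x, []) := by
  induction x with
  | nil => rfl
  | cons c t ih =>
    have hc : ¬ c = '\n' := fun h0 => h (h0 ▸ List.mem_cons_self)
    have ht : '\n' ∉ t := fun h0 => h (List.mem_cons_of_mem _ h0)
    simp only [partNl, if_neg hc, ih ht]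

theorem partNl_append {x : List Char} (y : List Char) (h : '\n' ∉ x) :
    partNl (x ++ '\n' :: y) = (x, y) := by
  induction x with
  | nil => simp [partNl]
  | cons c t ih =>
    have hc : ¬ c = '\n' := fun h0 => h (h0 ▸ List.mem_cons_self)
    have ht : '\n' ∉ t := fun h0 => h (List.mem_cons_of_mem _ h0)
    simp only [List.cons_append, partNl, if_neg hc, ih ht]

theorem head_dropWhile_false {p : List Char → Bool} {L xs : List (List Char)} {x : List Char}
    (h : List.dropWhile p L = x :: xs) : p x = false := by
  induction L with
  | nil => simp at h
  | cons y l ih =>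
    rw [List.dropWhile_cons] at h
    by_cases hy : p y = true
    · exact ih (by rwa [if_pos hy] at h)
    · rw [if_neg hy] at h
      obtain ⟨rfl, -⟩ := List.cons.inj h
      exact Bool.eq_false_iff.2 hy

-- the core equivalence, stated on the line list
theorem core (L : List (List Char)) (hnl : ∀ l ∈ L, '\n' ∉ l) :
    (match popTrailing (L.dropWhile (fun l => (PySem.Chars.strip l).isEmpty)) with
      | [] => ((none : Option String), (none : Option String))
      | l0 :: rest =>
        (some (String.ofList (PySem.Chars.strip l0)),
         some (String.ofList (PySem.Chars.strip (PySem.Chars.join ['\n']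
            (rest.dropWhile (fun l => (PySem.Chars.strip l).isEmpty)))))))
    = (let body := PySem.Chars.strip (PySem.Chars.join ['\n'] L)
       if body.isEmpty then (none, none)
       else (some (String.ofList (PySem.Chars.strip (partNl body).1)),
             some (String.ofList (PySem.Chars.strip (partNl body).2)))) := by
  have hbody : PySem.Chars.strip (PySem.Chars.join ['\n'] L)
      = PySem.Chars.strip (PySem.Chars.join ['\n']
          (popTrailing (L.dropWhile (fun l => (PySem.Chars.strip l).isEmpty)))) := by
    obtain ⟨S, hdec, hSb⟩ :=
      popTrailing_decomp (L.dropWhile (fun l => (PySem.Chars.strip l).isEmpty))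
    rw [← strip_join_dropWhile L]
    conv_lhs => rw [hdec]
    exact strip_join_append_blank hSb
  rcases hL2 : popTrailing (L.dropWhile (fun l => (PySem.Chars.strip l).isEmpty)) with _ | ⟨h, t⟩
  · rw [hL2] at hbody
    have hb : PySem.Chars.strip (PySem.Chars.join ['\n'] L) = [] := by rw [hbody]; rfl
    simp [hb]
  · -- h :: t is a final segment of a suffix of L
    obtain ⟨S, hdec, hSb⟩ :=
      popTrailing_decomp (L.dropWhile (fun l => (PySem.Chars.strip l).isEmpty))
    rw [hL2] at hdec
    have hmemL : ∀ l ∈ h :: t, l ∈ L := by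
      intro l hl
      have h1 : l ∈ L.dropWhile (fun l => (PySem.Chars.strip l).isEmpty) := by
        rw [hdec]; exact List.mem_append_left _ hl
      exact List.Sublist.mem h1 (List.dropWhile_sublist _)
    have hnlh : '\n' ∉ h := hnl h (hmemL h List.mem_cons_self)
    have hph : (PySem.Chars.strip h).isEmpty = false :=
      head_dropWhile_false (p := fun l => (PySem.Chars.strip l).isEmpty) (L := L)
        (x := h) (xs := t ++ S) (by rw [hdec]; rfl)
    have hphne : PySem.Chars.strip h ≠ [] := by
      intro h0; rw [h0] at hph; simp at hph
    rw [hL2] at hbody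
    cases t with
    | nil =>
      have hb : PySem.Chars.strip (PySem.Chars.join ['\n'] L) = PySem.Chars.strip h := by
        rw [hbody, PySem.Chars.join_singleton]
      have hnb : '\n' ∉ PySem.Chars.strip h := fun hm => hnlh (mem_strip hm)
      simp [hb, List.isEmpty_iff, hphne, partNl_no_nl hnb, strip_strip, PySem.Chars.join_nil]
    | cons m t' =>
      have hlast : ∃ l, (h :: m :: t').getLast? = some l ∧ (PySem.Chars.strip l).isEmpty = false := by
        rcases popTrailing_last (L.dropWhile (fun l => (PySem.Chars.strip l).isEmpty)) with hnil | hex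
        · rw [hL2] at hnil; cases hnil
        · rw [hL2] at hex; exact hex
      obtain ⟨lst, hlst, hlstb⟩ := hlast
      have hjne : PySem.Chars.rstrip (PySem.Chars.join ['\n'] (m :: t')) ≠ [] := by
        intro h0
        have hall := (rstrip_eq_nil_iff _).1 h0
        have hmem : lst ∈ m :: t' := by
          rw [List.getLast?_cons_cons] at hlst
          exact List.mem_of_getLast? hlst
        have : PySem.Chars.strip lst = [] := (strip_eq_nil_iff lst).2 (join_all_sp hall lst hmem)
        rw [this] at hlstb; simp at hlstb
      have hlh : PySem.Chars.lstrip h ≠ [] := by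
        intro h0
        apply hphne
        show PySem.Chars.rstrip (PySem.Chars.lstrip h) = []
        rw [h0]; rfl
      have hb : PySem.Chars.strip (PySem.Chars.join ['\n'] L)
          = PySem.Chars.lstrip h ++ '\n' :: PySem.Chars.rstrip (PySem.Chars.join ['\n'] (m :: t')) := by
        rw [hbody, PySem.Chars.join_cons_cons, List.append_assoc]
        show PySem.Chars.rstrip (PySem.Chars.lstrip _) = _
        unfold PySem.Chars.lstrip
        rw [List.dropWhile_append, if_neg (show ¬((List.dropWhile PySem.Chars.isspace h).isEmpty = true)
          from fun hc => hlh (List.isEmpty_iff.1 hc))]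
        rw [← List.append_assoc, rstrip_append_of_ne hjne]
        simp
      have hbE : (PySem.Chars.strip (PySem.Chars.join ['\n'] L)).isEmpty = false := by
        rw [hb]; simp
      have hpart : partNl (PySem.Chars.strip (PySem.Chars.join ['\n'] L))
          = (PySem.Chars.lstrip h, PySem.Chars.rstrip (PySem.Chars.join ['\n'] (m :: t'))) := by
        rw [hb]
        exact partNl_append _ (fun hm => hnlh (mem_lstrip hm))
      simp [hbE, hpart, strip_lstrip, strip_rstrip, strip_join_dropWhile]

-- ===== VERDICT (by name: the statement is the Claim_ definition above) =====
theorem qa_from_block_spec : Claim_equal_qa_from_block := by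
  intro block _
  unfold Spec_qa_from_block qa_from_block qa_from_block_alt
  generalize (PySem.Chars.replace (PySem.Chars.replace block.toList ['\r', '\n'] ['\n']) ['\r'] ['\n']) = cs
  rw [splitOn_newline]
  conv_rhs => rw [← join_mySplit cs]
  exact core (mySplit cs) (noNl_mySplit cs)
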